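-- pv_equiv track=rewrite | github.com/BeelzebubCode/Python-Tutorial | 66310837/Algorithm/Lab4/gray_code.py | gray_code_kth
-- ===== SOURCE A (Python) =====
-- def gray_code_kth(n, k):
--     def generate_gray(n):
--         if n == 1:
--             return ['0', '1']
--         prev = generate_gray(n - 1)
--         return ['0' + code for code in prev] + ['1' + code for code in reversed(prev)]
--
--     codes = generate_gray(n)
--     return codes[k]
-- ===== SOURCE B (Python) =====
-- def gray_code_kth(n, k):
--     # O(n): walk down the reflect-and-prefix structure, emitting one bit per level,
--     # instead of materialising all 2**n codes.
--     size = 1 << n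
--     if not -size <= k < size:
--         raise IndexError('list index out of range')
--     m = k + size if k < 0 else k
--
--     def kth(n, m):
--         if n == 1:
--             return '0' if m == 0 else '1'
--         half = 1 << (n - 1)
--         if m < half:
--             return '0' + kth(n - 1, m)
--         return '1' + kth(n - 1, 2 * half - 1 - m)
--
--     return kth(n, m)
-- ===== Notes on version B (the rewrite author's own statement) =====
-- stated objective: faster
-- what changed: Instead of recursively building the full list of all 2^n Gray codes and indexing it, B descends the reflect-and-prefix structure once, deciding each output bit from the index, so only the k-th code is constructed; intended as faster (measured: A timed out at n=16 where B returned; too few both-finished inputs to confirm a ratio).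
import Mathlib
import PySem

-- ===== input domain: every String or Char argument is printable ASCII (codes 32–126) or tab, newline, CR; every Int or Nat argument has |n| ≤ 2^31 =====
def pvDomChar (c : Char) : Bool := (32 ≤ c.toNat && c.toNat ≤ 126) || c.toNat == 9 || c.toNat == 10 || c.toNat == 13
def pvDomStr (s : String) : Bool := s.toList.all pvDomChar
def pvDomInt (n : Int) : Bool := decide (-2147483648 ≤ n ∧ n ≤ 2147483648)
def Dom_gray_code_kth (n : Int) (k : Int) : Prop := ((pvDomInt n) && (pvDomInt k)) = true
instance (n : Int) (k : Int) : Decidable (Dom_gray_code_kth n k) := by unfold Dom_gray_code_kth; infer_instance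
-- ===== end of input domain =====

-- B replaces A's construction of all 2^n Gray codes by a single descent of the reflect-and-prefix
-- structure, one bit per level (intended as faster; measured: A timed out at n=16 where B returned); like A, B raises on out-of-range k.

-- ===== PORT A =====
-- generate_gray(n); n ≤ 0 recurses forever in Python (RecursionError), excluded by Pre_: case 0 returns []
def generateGray : Nat → List String
  | 0 => []
  | 1 => ["0", "1"]
  | m + 2 =>
      let prev := generateGray (m + 1)
      prev.map (fun code => "0" ++ code) ++ prev.reverse.map (fun code => "1" ++ code)

-- codes[k]; IndexError (pyGet? = none) excluded by Pre_, defaulted to ""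
def gray_code_kth (n : Int) (k : Int) : String :=
  (PySem.List.pyGet? (generateGray n.toNat) k).getD ""

-- ===== PORT B =====
-- kth(n, m); Python raises on n ≤ 0 (1 << (n-1) with n-1 < 0), excluded by Pre_: case 0 returns ""
def kthGray : Nat → Nat → String
  | 0, _ => ""
  | 1, m => if m == 0 then "0" else "1"
  | j + 2, m =>
      let half := 2 ^ (j + 1)
      if m < half then "0" ++ kthGray (j + 1) m
      else "1" ++ kthGray (j + 1) (2 * half - 1 - m)

-- B's explicit IndexError on out-of-range k → "" here; excluded by Pre_
def gray_code_kth_alt (n : Int) (k : Int) : String :=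
  let size : Int := 2 ^ n.toNat
  if ¬ (-size ≤ k ∧ k < size) then ""
  else
    let m : Int := if k < 0 then k + size else k
    kthGray n.toNat m.toNat

-- ===== PRECONDITION & SPEC =====
-- Pre_ excludes n ≤ 0 (A's recursion never terminates: RecursionError) and k outside
-- [-2^n, 2^n) (A raises IndexError on codes[k]; B raises IndexError there too).
def Pre_gray_code_kth (n : Int) (k : Int) : Prop :=
  1 ≤ n ∧ -((2 : Int) ^ n.toNat) ≤ k ∧ k < (2 : Int) ^ n.toNat
instance (n : Int) (k : Int) : Decidable (Pre_gray_code_kth n k) := by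
  unfold Pre_gray_code_kth; infer_instance

def pvWitness_gray_code_kth : Int × Int := (3, 5)

def Spec_gray_code_kth (n : Int) (k : Int) (out : String) : Prop := out = gray_code_kth_alt n k
instance (n : Int) (k : Int) (out : String) : Decidable (Spec_gray_code_kth n k out) := by
  unfold Spec_gray_code_kth; infer_instance

-- ===== CLAIM (what is proved, stated in full; the proofs are below) =====
def Claim_equal_gray_code_kth : Prop := ∀ (n : Int) (k : Int), Dom_gray_code_kth n k → Pre_gray_code_kth n k → Spec_gray_code_kth n k (gray_code_kth n k)

-- ===== LEMMAS AND PROOFS =====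

lemma length_generateGray (m : Nat) : (generateGray (m + 1)).length = 2 ^ (m + 1) := by
  induction m with
  | zero => rfl
  | succ j ih =>
      simp [generateGray, ih]
      ring

lemma generateGray_getElem? (m i : Nat) (hi : i < 2 ^ (m + 1)) :
    (generateGray (m + 1))[i]? = some (kthGray (m + 1) i) := by
  induction m generalizing i with
  | zero =>
      interval_cases i <;> rfl
  | succ j ih =>
      have hlen : (generateGray (j + 1)).length = 2 ^ (j + 1) := length_generateGray j
      by_cases h : i < 2 ^ (j + 1)
      · rw [show generateGray (j + 1 + 1) =
              (generateGray (j + 1)).map (fun code => "0" ++ code) ++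
                (generateGray (j + 1)).reverse.map (fun code => "1" ++ code) from rfl]
        rw [List.getElem?_append_left (by simp [hlen, h])]
        rw [List.getElem?_map, ih i h]
        rw [show kthGray (j + 1 + 1) i = "0" ++ kthGray (j + 1) i from by
          simp [kthGray, h]]
        rfl
      · replace h : 2 ^ (j + 1) ≤ i := by omega
        rw [show generateGray (j + 1 + 1) =
              (generateGray (j + 1)).map (fun code => "0" ++ code) ++
                (generateGray (j + 1)).reverse.map (fun code => "1" ++ code) from rfl]
        have hlen0 : ((generateGray (j + 1)).map (fun code => "0" ++ code)).length = 2 ^ (j + 1) := by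
          simp [hlen]
        rw [List.getElem?_append_right (by omega)]
        rw [List.getElem?_map]
        have hj : i - ((generateGray (j + 1)).map (fun code => "0" ++ code)).length
            < (generateGray (j + 1)).length := by
          simp [hlen0, hlen]
          have : 2 ^ (j + 1 + 1) = 2 * 2 ^ (j + 1) := by ring
          omega
        rw [List.getElem?_reverse hj]
        have hidx : (generateGray (j+1)).length - 1 -
            (i - ((generateGray (j + 1)).map (fun code => "0" ++ code)).length)
            = 2 ^ (j + 1 + 1) - 1 - i := by
          simp [hlen0, hlen]
          have : 2 ^ (j + 1 + 1) = 2 * 2 ^ (j + 1) := by ring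
          omega
        rw [hidx]
        have hlt : 2 ^ (j + 1 + 1) - 1 - i < 2 ^ (j + 1) := by
          have : 2 ^ (j + 1 + 1) = 2 * 2 ^ (j + 1) := by ring
          omega
        rw [ih _ hlt]
        rw [show kthGray (j + 1 + 1) i = "1" ++ kthGray (j + 1) (2 * 2 ^ (j + 1) - 1 - i) from by
          simp [kthGray, h]]
        have : 2 * 2 ^ (j + 1) - 1 - i = 2 ^ (j + 1 + 1) - 1 - i := by
          have : 2 ^ (j + 1 + 1) = 2 * 2 ^ (j + 1) := by ring
          omega
        rw [this]
        rfl

-- ===== VERDICT (by name: the statement is the Claim_ definition above) =====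
theorem gray_code_kth_spec : Claim_equal_gray_code_kth := by
  intro n k _ hPre
  obtain ⟨hn, hk1, hk2⟩ := hPre
  unfold Spec_gray_code_kth gray_code_kth gray_code_kth_alt
  obtain ⟨m, hm⟩ : ∃ m, n.toNat = m + 1 := ⟨n.toNat - 1, by omega⟩
  have hpow : ((2 : Int) ^ n.toNat) = ((2 ^ n.toNat : Nat) : Int) := by push_cast; ring
  have hlenN : (generateGray n.toNat).length = 2 ^ n.toNat := by
    rw [hm, length_generateGray]
  simp only [if_neg (show ¬¬(-(2:Int) ^ n.toNat ≤ k ∧ k < (2:Int) ^ n.toNat) from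
    not_not_intro ⟨hk1, hk2⟩)]
  by_cases hk0 : k < 0
  · -- negative k: Python indexes from the end; B adds 2^n
    simp only [if_pos hk0]
    set j : Nat := (-k).toNat with hj
    have hjpos : 0 < j := by omega
    have hkeq : k = -(j : Int) := by omega
    have hjle : j ≤ (generateGray n.toNat).length := by
      rw [hlenN]; rw [hpow] at hk1; omega
    conv_lhs => rw [hkeq, PySem.List.pyGet?_neg_natCast _ j hjpos hjle]
    have hidx : (generateGray n.toNat).length - j < 2 ^ n.toNat := by
      rw [hlenN]; omega
    have hmt : (k + (2 : Int) ^ n.toNat).toNat = (generateGray n.toNat).length - j := by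
      rw [hlenN, hpow]; omega
    rw [hm] at hidx hmt ⊢
    rw [generateGray_getElem? m _ hidx]
    simp only [Option.getD_some]
    rw [hmt]
  · -- nonnegative k: plain indexing
    simp only [if_neg hk0]
    rw [PySem.List.pyGet?_of_nonneg _ (by omega)]
    have hlt : k.toNat < 2 ^ n.toNat := by rw [hpow] at hk2; omega
    rw [hm] at hlt ⊢
    rw [generateGray_getElem? m k.toNat hlt]
    simp only [Option.getD_some]
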